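-- pv_equiv track=rewrite | github.com/deafjamz/my-hearing-app | scripts/ingest_spanish_launch_content.py | slugify_audio_token
-- ===== SOURCE A (Python) =====
-- import unicodedata
--
-- def slugify_audio_token(value: str) -> str:
--     normalized = unicodedata.normalize("NFD", value.strip().lower())
--     ascii_only = "".join(char for char in normalized if unicodedata.category(char) != "Mn")
--     cleaned = []
--     prev_underscore = False
--     for char in ascii_only:
--         keep = char.isalnum() or char in {"_", "-"}
--         if keep:
--             cleaned.append(char)
--             prev_underscore = False
--         elif not prev_underscore:
--             cleaned.append("_")
--             prev_underscore = True
--     token = "".join(cleaned).strip("_")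
--     return (token[:64] or "item")
-- ===== SOURCE B (Python) =====
-- import unicodedata
--
-- def slugify_audio_token(value: str) -> str:
--     normalized = unicodedata.normalize("NFD", value.strip().lower())
--     ascii_only = [c for c in normalized if unicodedata.category(c) != "Mn"]
--
--     def keep(c):
--         return c.isalnum() or c in "_-"
--
--     words = []
--     i, n = 0, len(ascii_only)
--     while i < n:
--         if keep(ascii_only[i]):
--             j = i
--             while j < n and keep(ascii_only[j]):
--                 j += 1
--             words.append("".join(ascii_only[i:j]))
--             i = j
--         else:
--             i += 1
--     token = "_".join(words).strip("_")
--     return token[:64] or "item"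
-- ===== Notes on version B (the rewrite author's own statement) =====
-- stated objective: alternative
-- what changed: Replaces A's character-by-character state machine (prev_underscore flag deciding per char whether to emit '_') by a two-pointer run scanner that extracts each maximal run of kept characters as a word and joins the words with single underscores.
import Mathlib
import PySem

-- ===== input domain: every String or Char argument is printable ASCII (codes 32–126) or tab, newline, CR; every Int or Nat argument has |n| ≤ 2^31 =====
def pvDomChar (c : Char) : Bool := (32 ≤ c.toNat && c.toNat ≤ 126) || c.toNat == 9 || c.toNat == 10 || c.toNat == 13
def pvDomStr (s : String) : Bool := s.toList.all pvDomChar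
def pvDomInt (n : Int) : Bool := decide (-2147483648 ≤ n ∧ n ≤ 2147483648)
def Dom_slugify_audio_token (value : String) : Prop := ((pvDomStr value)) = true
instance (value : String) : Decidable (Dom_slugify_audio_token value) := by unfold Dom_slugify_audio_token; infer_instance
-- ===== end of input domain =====

-- B replaces A's per-character prev_underscore state machine by a run scanner that collects maximal
-- keep-runs as words and joins them with single underscores (alternative decomposition, same cost).

-- ===== PORT A =====
-- unicodedata.category(char) == "Mn": no character of the printable-ASCII/tab/NL/CR domain has
-- category Mn, and NFD normalization is the identity there (hand-ported, exact on Dom).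
def pyCategoryIsMn (_c : Char) : Bool := false

-- char.isalnum() or char in {"_", "-"}
def keepChar (c : Char) : Bool := PySem.Chars.isalnum c || c == '_' || c == '-'

def slugify_audio_token (value : String) : String :=
  -- normalized = unicodedata.normalize("NFD", value.strip().lower())
  let normalized := PySem.Chars.lower (PySem.Chars.strip value.toList)
  -- ascii_only = "".join(char for char in normalized if unicodedata.category(char) != "Mn")
  let ascii_only := normalized.filter (fun c => !pyCategoryIsMn c)
  -- cleaned = []; prev_underscore = False; for char in ascii_only: …
  let st := ascii_only.foldl (fun (s : List Char × Bool) c =>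
      if keepChar c then (s.1 ++ [c], false)
      else if s.2 then s
      else (s.1 ++ ['_'], true)) ([], false)
  -- token = "".join(cleaned).strip("_")
  let token := PySem.Chars.stripChars st.1 ['_']
  -- return (token[:64] or "item")
  let truncated := PySem.List.slice token none (some 64)
  if truncated.isEmpty then "item" else String.mk truncated

-- ===== PORT B =====
-- B's outer while loop scans runs: on a kept head char the inner 'while j < n and keep' loop
-- advances past the maximal kept run (takeWhile / dropWhile of keepChar, exact), which becomes
-- one word; a rejected char is skipped.
def wordsRec : List Char → List (List Char)
  | [] => []
  | c :: t =>
    if keepChar c then (c :: t.takeWhile keepChar) :: wordsRec (t.dropWhile keepChar)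
    else wordsRec t
termination_by l => l.length
decreasing_by
  · exact Nat.lt_succ_of_le (List.length_dropWhile_le _ _)
  · exact Nat.lt_succ_self _

def slugify_audio_token_alt (value : String) : String :=
  -- normalized / ascii_only: same prefix as A (Source B keeps it verbatim)
  let normalized := PySem.Chars.lower (PySem.Chars.strip value.toList)
  let ascii_only := normalized.filter (fun c => !pyCategoryIsMn c)
  -- words = []; i, n = 0, len(ascii_only); while i < n: … (run scanner)
  let words := wordsRec ascii_only
  -- token = "_".join(words).strip("_")
  let token := PySem.Chars.stripChars (PySem.Chars.join ['_'] words) ['_']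
  -- return token[:64] or "item"
  let truncated := PySem.List.slice token none (some 64)
  if truncated.isEmpty then "item" else String.mk truncated

-- ===== PRECONDITION & SPEC =====
def Spec_slugify_audio_token (value : String) (out : String) : Prop := out = slugify_audio_token_alt value
instance (value : String) (out : String) : Decidable (Spec_slugify_audio_token value out) := by unfold Spec_slugify_audio_token; infer_instance

-- ===== CLAIM (what is proved, stated in full; the proofs are below) =====
def Claim_equal_slugify_audio_token : Prop := ∀ (value : String), Dom_slugify_audio_token value → Spec_slugify_audio_token value (slugify_audio_token value)

-- ===== LEMMAS AND PROOFS =====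

-- A's loop, as a structural recursion (cleaned list, given prev_underscore)
def cleanRec : List Char → Bool → List Char
  | [], _ => []
  | c :: t, p =>
    if keepChar c then c :: cleanRec t false
    else if p then cleanRec t p
    else '_' :: cleanRec t true

theorem foldA (l : List Char) (acc : List Char) (p : Bool) :
    (l.foldl (fun (s : List Char × Bool) c =>
      if keepChar c then (s.1 ++ [c], false)
      else if s.2 then s
      else (s.1 ++ ['_'], true)) (acc, p)).1 = acc ++ cleanRec l p := by
  induction l generalizing acc p with
  | nil => simp [cleanRec]
  | cons c t ih =>
    by_cases hk : keepChar c <;> by_cases hp : p <;>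
      simp [cleanRec, hk, hp, List.foldl_cons, ih]

-- run lemmas for A's machine
theorem cleanRec_keep_run (w : List Char) (hw : ∀ c ∈ w, keepChar c = true) (rest : List Char) :
    cleanRec (w ++ rest) false = w ++ cleanRec rest false := by
  induction w with
  | nil => simp
  | cons c w' ih =>
    have hc := hw c (by simp)
    simp [cleanRec, hc, ih (fun d hd => hw d (by simp [hd]))]

theorem cleanRec_bad_run (b : List Char) (hb : ∀ c ∈ b, keepChar c = false) (rest : List Char) :
    cleanRec (b ++ rest) true = cleanRec rest true := by
  induction b with
  | nil => simp
  | cons c b' ih =>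
    have hc := hb c (by simp)
    simp [cleanRec, hc, ih (fun d hd => hb d (by simp [hd]))]

theorem wordsRec_bad_prefix (b : List Char) (hb : ∀ c ∈ b, keepChar c = false) (rest : List Char) :
    wordsRec (b ++ rest) = wordsRec rest := by
  induction b with
  | nil => simp
  | cons c b' ih =>
    have hc := hb c (by simp)
    simp only [List.cons_append, wordsRec, hc, Bool.false_eq_true, if_false]
    exact ih (fun d hd => hb d (by simp [hd]))

theorem getLastD_indep (t : List Char) (h : t ≠ []) (x y : Char) :
    t.getLastD x = t.getLastD y := by
  rw [List.getLastD_eq_getLast?, List.getLastD_eq_getLast?, List.getLast?_eq_some_getLast h]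
  rfl

theorem getLastD_append (w b : List Char) (h : b ≠ []) : ∀ d : Char,
    (w ++ b).getLastD d = b.getLastD d := by
  induction w with
  | nil => intro d; rfl
  | cons a w' ih =>
    intro d
    simp only [List.cons_append, List.getLastD_cons]
    rw [ih a]
    exact getLastD_indep b h a d

-- trailing-underscore flag of A's machine started with prev_underscore = True
def trailB (l : List Char) : Bool := !(wordsRec l).isEmpty && !keepChar (l.getLastD 'a')

theorem dropWhile_head_not {p : Char → Bool} {t : List Char} {d : Char} {r : List Char}
    (h : t.dropWhile p = d :: r) : p d = false := by
  induction t with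
  | nil => simp at h
  | cons a t' ih =>
    by_cases ha : p a
    · exact ih (by simpa [List.dropWhile_cons, ha] using h)
    · simp only [List.dropWhile_cons, ha, Bool.false_eq_true, if_false] at h
      cases h
      simpa using ha

theorem cleanRec_true_eq : ∀ n (l : List Char), l.length ≤ n →
    cleanRec l true = PySem.Chars.join ['_'] (wordsRec l) ++ (if trailB l then ['_'] else []) := by
  intro n
  induction n with
  | zero =>
    intro l hl
    have : l = [] := List.eq_nil_of_length_eq_zero (Nat.le_zero.mp hl)
    subst this
    simp [cleanRec, wordsRec, trailB, PySem.Chars.join, List.intercalate]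
  | succ n ih =>
    intro l hl
    cases l with
    | nil => simp [cleanRec, wordsRec, trailB, PySem.Chars.join, List.intercalate]
    | cons c t =>
      have ht : t.length ≤ n := by simpa using hl
      by_cases hk : keepChar c
      · -- keep head: l = c :: w ++ r with w the keep run of t
        have hsplit : t.takeWhile keepChar ++ t.dropWhile keepChar = t :=
          List.takeWhile_append_dropWhile
        set w := t.takeWhile keepChar with hw
        set r := t.dropWhile keepChar with hr
        have hwkeep : ∀ d ∈ w, keepChar d = true := by
          intro d hd; exact List.mem_takeWhile_imp hd
        have h1 : cleanRec (c :: t) true = c :: (w ++ cleanRec r false) := by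
          simp only [cleanRec, hk, if_pos]
          rw [← hsplit, cleanRec_keep_run w hwkeep r]
        have hmw : wordsRec (c :: t) = (c :: w) :: wordsRec r := by
          simp [wordsRec, hk, ← hw, ← hr]
        cases hrc : r with
        | nil =>
          -- no further characters: token is exactly the run, last char keeps
          have hlast : (c :: t).getLastD 'a' ∈ c :: t := by
            cases t with
            | nil => simp
            | cons b t' =>
              have : (c :: b :: t').getLastD 'a' = (b :: t').getLast (by simp) := by
                simp [List.getLastD_cons, List.getLastD_eq_getLast?, List.getLast?_eq_getLast]
              rw [this]
              exact List.mem_cons_of_mem _ (List.getLast_mem _)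
          have htw : t = w := by rw [← hsplit, hrc]; simp
          have hallkeep : ∀ d ∈ c :: t, keepChar d = true := by
            intro d hd
            rcases List.mem_cons.mp hd with h | h
            · subst h; exact hk
            · exact hwkeep d (htw ▸ h)
          have htrail : trailB (c :: t) = false := by
            have h2 : keepChar ((c :: t).getLastD 'a') = true := hallkeep _ hlast
            unfold trailB
            simp only [List.getLastD_eq_getLast?] at h2
            simp [h2]
          rw [h1, hrc, hmw, hrc, htrail]
          simp [cleanRec, wordsRec, PySem.Chars.join, List.intercalate]
        | cons d r' =>
          have hdbad : keepChar d = false := dropWhile_head_not (hrc ▸ hr.symm)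
          -- split r into its bad prefix b and the rest s
          have hrsplit : r.takeWhile (fun c => !keepChar c) ++ r.dropWhile (fun c => !keepChar c) = r :=
            List.takeWhile_append_dropWhile
          set b := r.takeWhile (fun c => !keepChar c) with hb
          set s := r.dropWhile (fun c => !keepChar c) with hs
          have hbbad : ∀ e ∈ b, keepChar e = false := by
            intro e he
            have := List.mem_takeWhile_imp he
            simpa using this
          have hbne : b ≠ [] := by
            rw [hb, hrc]
            simp [List.takeWhile_cons, hdbad]
          have h2 : cleanRec r false = '_' :: cleanRec s true := by
            cases hbc : b with
            | nil => exact absurd hbc hbne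
            | cons e b' =>
              have hrform : r = e :: (b' ++ s) := by
                rw [← hrsplit, hbc]; simp
              have hebad : keepChar e = false := hbbad e (by simp [hbc])
              rw [hrform]
              simp only [cleanRec, hebad, Bool.false_eq_true, if_false]
              rw [cleanRec_bad_run b' (fun x hx => hbbad x (by simp [hbc, hx])) s]
          have hmr : wordsRec r = wordsRec s := by
            rw [← hrsplit]; exact wordsRec_bad_prefix b hbbad s
          have hslen : s.length ≤ n := by
            calc s.length ≤ r.length := by rw [hs]; exact List.length_dropWhile_le _ _
              _ ≤ t.length := by rw [hr]; exact List.length_dropWhile_le _ _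
              _ ≤ n := ht
          have ihs := ih s hslen
          have htne : t ≠ [] := by
            intro h0
            have hre : r = [] := by rw [hr, h0]; rfl
            rw [hre] at hrc
            exact absurd hrc (by simp)
          cases hsc : s with
          | nil =>
            -- everything after the run is bad: one trailing '_'
            have : cleanRec (c :: t) true = c :: w ++ ['_'] := by
              rw [h1, h2, hsc]; simp [cleanRec]
            rw [this, hmw, hmr, hsc]
            have hlastbad : keepChar ((c :: t).getLastD 'a') = false := by
              have ht2 : t = w ++ b := by rw [← hsplit, ← hrsplit, hsc]; simp
              have : (c :: t).getLastD 'a' = b.getLastD 'a' := by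
                rw [List.getLastD_cons, ht2, getLastD_append w b hbne]
                exact getLastD_indep b hbne c 'a'
              rw [this]
              cases hbc : b with
              | nil => exact absurd hbc hbne
              | cons e b' =>
                have hmem : (e :: b').getLastD 'a' ∈ e :: b' := by
                  have : (e :: b').getLastD 'a' = (e :: b').getLast (by simp) := by
                    simp [List.getLastD_eq_getLast?, List.getLast?_eq_getLast]
                  rw [this]; exact List.getLast_mem _
                exact hbbad _ (hbc ▸ hmem)
            have htrail : trailB (c :: t) = true := by
              unfold trailB
              rw [hmw, hmr, hsc]
              simp only [List.getLastD_eq_getLast?] at hlastbad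
              simp [hlastbad, wordsRec]
            rw [htrail]
            simp [wordsRec, PySem.Chars.join, List.intercalate]
          | cons e s' =>
            have hekeep : keepChar e = true := by
              have := dropWhile_head_not (hsc ▸ hs.symm)
              simpa using this
            have hmsne : wordsRec s ≠ [] := by
              rw [hsc]; simp [wordsRec, hekeep]
            have hlasts : (c :: t).getLastD 'a' = s.getLastD 'a' := by
              have hsne : s ≠ [] := by rw [hsc]; simp
              have ht2 : t = w ++ (b ++ s) := by rw [← hsplit, ← hrsplit]
              have hbsne : b ++ s ≠ [] := by simp [hsne]
              rw [List.getLastD_cons, ht2, getLastD_append w (b ++ s) hbsne,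
                getLastD_append b s hsne]
              exact getLastD_indep s hsne c 'a'
            have htrailEq : trailB (c :: t) = trailB s := by
              unfold trailB
              rw [hmw, hmr, hlasts]
              simp [hmsne]
            rw [h1, h2, ihs, hmw, hmr, htrailEq]
            cases hms : wordsRec s with
            | nil => exact absurd hms hmsne
            | cons u us =>
              rw [PySem.Chars.join_cons_cons]
              simp
      · -- bad head: machine started with prev=True skips it
        have h1 : cleanRec (c :: t) true = cleanRec t true := by
          simp [cleanRec, hk]
        have hmw : wordsRec (c :: t) = wordsRec t := by
          simp [wordsRec, hk]
        have htrail : trailB (c :: t) = trailB t := by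
          unfold trailB
          rw [hmw]
          cases ht0 : t with
          | nil => simp [ht0, wordsRec]
          | cons b t' =>
            rw [List.getLastD_cons, getLastD_indep (b :: t') (by simp) c 'a']
        rw [h1, hmw, htrail]
        exact ih t ht

theorem drop_false_true (l : List Char) :
    (cleanRec l false).dropWhile (fun c => ['_'].contains c)
      = (cleanRec l true).dropWhile (fun c => ['_'].contains c) := by
  cases l with
  | nil => rfl
  | cons c t =>
    by_cases hk : keepChar c
    · simp [cleanRec, hk]
    · simp [cleanRec, hk, List.dropWhile_cons]

theorem strip_congr (x y : List Char) (h : x.dropWhile (fun c => ['_'].contains c)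
      = y.dropWhile (fun c => ['_'].contains c)) :
    PySem.Chars.stripChars x ['_'] = PySem.Chars.stripChars y ['_'] := by
  show (List.dropWhile (fun c => ['_'].contains c)
      (List.dropWhile (fun c => ['_'].contains c) x).reverse).reverse
    = (List.dropWhile (fun c => ['_'].contains c)
      (List.dropWhile (fun c => ['_'].contains c) y).reverse).reverse
  rw [h]

theorem strip_append_underscore (x : List Char) :
    PySem.Chars.stripChars (x ++ ['_']) ['_'] = PySem.Chars.stripChars x ['_'] := by
  show (List.dropWhile (fun c => ['_'].contains c)
      (List.dropWhile (fun c => ['_'].contains c) (x ++ ['_'])).reverse).reverse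
    = (List.dropWhile (fun c => ['_'].contains c)
      (List.dropWhile (fun c => ['_'].contains c) x).reverse).reverse
  rw [List.dropWhile_append]
  by_cases hx : List.dropWhile (fun c => ['_'].contains c) x = []
  · rw [hx]
    simp [List.dropWhile]
  · rw [if_neg (by simp only [List.isEmpty_iff]; exact hx)]
    simp [List.reverse_append, List.dropWhile_cons]

theorem token_eq (l : List Char) :
    PySem.Chars.stripChars (l.foldl (fun (s : List Char × Bool) c =>
        if keepChar c then (s.1 ++ [c], false)
        else if s.2 then s
        else (s.1 ++ ['_'], true)) ([], false)).1 ['_']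
      = PySem.Chars.stripChars (PySem.Chars.join ['_'] (wordsRec l)) ['_'] := by
  rw [foldA l [] false, List.nil_append]
  have h1 : PySem.Chars.stripChars (cleanRec l false) ['_']
      = PySem.Chars.stripChars (cleanRec l true) ['_'] :=
    strip_congr _ _ (drop_false_true l)
  rw [h1, cleanRec_true_eq l.length l (le_refl _)]
  by_cases ht : trailB l
  · rw [if_pos ht]; exact strip_append_underscore _
  · rw [if_neg ht, List.append_nil]

-- ===== VERDICT (by name: the statement is the Claim_ definition above) =====
theorem slugify_audio_token_spec : Claim_equal_slugify_audio_token := by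
  intro value _
  unfold Spec_slugify_audio_token slugify_audio_token slugify_audio_token_alt
  simp only [token_eq]
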